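-- pv_equiv track=rewrite | github.com/Tejasv2002/Hotel-Room-Service-Order-Agent | app.py | dietary_conflict
-- ===== SOURCE A (Python) =====
-- def dietary_conflict(item, prefs):
--     """
--     Return a list of conflicting preference keys.
--     E.g., item tags do not include 'vegan' while prefs contains 'vegan'.
--     """
--     item_tags = set(item.get("tags", []))
--     conflicts = []
--     for p in prefs:
--         if p == "vegan" and "vegan" not in item_tags:
--             conflicts.append(p)
--         if p == "vegetarian" and ("vegetarian" not in item_tags and "vegan" not in item_tags):
--             conflicts.append(p)
--         if p == "gluten-free" and "gluten-free" not in item_tags: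
--             conflicts.append(p)
--         if p == "dairy-free" and "dairy-free" not in item_tags:
--             conflicts.append(p)
--         if p == "nut-free" and "nut-free" not in item_tags:
--             conflicts.append(p)
--     return list(set(conflicts))
-- ===== SOURCE B (Python) =====
-- # Inverted traversal: fold over the ITEM'S TAGS to accumulate the set of
-- # satisfied preferences, then pure set algebra (prefs & known - satisfied)
-- # yields the conflicts; A instead loops over prefs with per-pref tag tests.
-- _SATISFIES = {
--     "vegan": frozenset({"vegan", "vegetarian"}),
--     "vegetarian": frozenset({"vegetarian"}),
--     "gluten-free": frozenset({"gluten-free"}),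
--     "dairy-free": frozenset({"dairy-free"}),
--     "nut-free": frozenset({"nut-free"}),
-- }
-- _KNOWN = frozenset(_SATISFIES)
--
-- def dietary_conflict(item, prefs):
--     satisfied = set()
--     for tag in item.get("tags", []):
--         satisfied |= _SATISFIES.get(tag, frozenset())
--     return list((set(prefs) & _KNOWN) - satisfied)
-- ===== Notes on version B (the rewrite author's own statement) =====
-- stated objective: alternative
-- what changed: Inverted the traversal: instead of looping over prefs and testing each against the tags, B folds over the item's tags to build the set of preferences they satisfy, then computes conflicts by set algebra (set(prefs) & known - satisfied).
import Mathlib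
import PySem

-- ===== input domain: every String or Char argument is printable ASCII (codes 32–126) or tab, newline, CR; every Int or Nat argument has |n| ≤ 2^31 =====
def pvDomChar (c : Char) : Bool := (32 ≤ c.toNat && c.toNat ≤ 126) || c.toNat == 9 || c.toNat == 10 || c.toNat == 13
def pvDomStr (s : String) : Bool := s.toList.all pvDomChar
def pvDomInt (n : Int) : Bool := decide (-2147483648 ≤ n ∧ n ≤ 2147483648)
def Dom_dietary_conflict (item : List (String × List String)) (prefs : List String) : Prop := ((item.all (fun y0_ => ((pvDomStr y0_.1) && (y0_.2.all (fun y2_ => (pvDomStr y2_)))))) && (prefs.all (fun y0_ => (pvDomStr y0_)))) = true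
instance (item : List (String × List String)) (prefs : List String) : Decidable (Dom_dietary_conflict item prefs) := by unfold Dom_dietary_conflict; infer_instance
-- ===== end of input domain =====

-- B inverts A's traversal: it folds over the item's tags to build the set of
-- satisfied preferences, then computes conflicts by set algebra (alternative).

-- ===== PORT A =====
def dietary_conflict (item : List (String × List String)) (prefs : List String) : List String :=
  let item_tags : PySem.Set String := PySem.Set.ofList (PySem.Dict.getD (PySem.Dict.ofList item) "tags" [])
  let conflicts : List String := prefs.foldl (fun acc p =>
    let acc := if p == "vegan" && !(PySem.Set.contains item_tags "vegan") then acc ++ [p] else acc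
    let acc := if p == "vegetarian" && (!(PySem.Set.contains item_tags "vegetarian") && !(PySem.Set.contains item_tags "vegan")) then acc ++ [p] else acc
    let acc := if p == "gluten-free" && !(PySem.Set.contains item_tags "gluten-free") then acc ++ [p] else acc
    let acc := if p == "dairy-free" && !(PySem.Set.contains item_tags "dairy-free") then acc ++ [p] else acc
    let acc := if p == "nut-free" && !(PySem.Set.contains item_tags "nut-free") then acc ++ [p] else acc
    acc) []
  PySem.Set.ofList conflicts

-- ===== PORT B =====
-- the table _SATISFIES of Source B: tag ↦ preferences that tag satisfies
def pvSatisfies : PySem.Dict String (PySem.Set String) := PySem.Dict.mk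
  [("vegan", ["vegan", "vegetarian"]),
   ("vegetarian", ["vegetarian"]),
   ("gluten-free", ["gluten-free"]),
   ("dairy-free", ["dairy-free"]),
   ("nut-free", ["nut-free"])]

-- _KNOWN = frozenset(_SATISFIES)
def pvKnown : PySem.Set String := PySem.Set.ofList (PySem.Dict.keys pvSatisfies)

def dietary_conflict_alt (item : List (String × List String)) (prefs : List String) : List String :=
  let satisfied : PySem.Set String :=
    (PySem.Dict.getD (PySem.Dict.ofList item) "tags" []).foldl
      (fun s tag => PySem.Set.union s (PySem.Dict.getD pvSatisfies tag PySem.Set.empty))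
      PySem.Set.empty
  PySem.Set.diff (PySem.Set.inter (PySem.Set.ofList prefs) pvKnown) satisfied

-- ===== PRECONDITION & SPEC =====
def Spec_dietary_conflict (item : List (String × List String)) (prefs : List String) (out : List String) : Prop := out = dietary_conflict_alt item prefs
instance (item : List (String × List String)) (prefs : List String) (out : List String) : Decidable (Spec_dietary_conflict item prefs out) := by unfold Spec_dietary_conflict; infer_instance

-- ===== CLAIM =====
def Claim_equal_dietary_conflict : Prop := ∀ (item : List (String × List String)) (prefs : List String), Dom_dietary_conflict item prefs → Spec_dietary_conflict item prefs (dietary_conflict item prefs)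

-- ===== LEMMAS AND PROOFS =====

-- A's per-pref condition, abbreviated
def pvCondA (tags : PySem.Set String) (p : String) : Bool :=
  (p == "vegan" && !(PySem.Set.contains tags "vegan")) ||
  (p == "vegetarian" && (!(PySem.Set.contains tags "vegetarian") && !(PySem.Set.contains tags "vegan"))) ||
  (p == "gluten-free" && !(PySem.Set.contains tags "gluten-free")) ||
  (p == "dairy-free" && !(PySem.Set.contains tags "dairy-free")) ||
  (p == "nut-free" && !(PySem.Set.contains tags "nut-free"))

theorem pvStep_eq (tags : PySem.Set String) (acc : List String) (p : String) :
    (let acc := if p == "vegan" && !(PySem.Set.contains tags "vegan") then acc ++ [p] else acc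
     let acc := if p == "vegetarian" && (!(PySem.Set.contains tags "vegetarian") && !(PySem.Set.contains tags "vegan")) then acc ++ [p] else acc
     let acc := if p == "gluten-free" && !(PySem.Set.contains tags "gluten-free") then acc ++ [p] else acc
     let acc := if p == "dairy-free" && !(PySem.Set.contains tags "dairy-free") then acc ++ [p] else acc
     let acc := if p == "nut-free" && !(PySem.Set.contains tags "nut-free") then acc ++ [p] else acc
     acc) = if pvCondA tags p then acc ++ [p] else acc := by
  by_cases h1 : p = "vegan"
  · subst h1; simp [pvCondA]
  · by_cases h2 : p = "vegetarian"
    · subst h2; simp [pvCondA]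
    · by_cases h3 : p = "gluten-free"
      · subst h3; simp [pvCondA]
      · by_cases h4 : p = "dairy-free"
        · subst h4; simp [pvCondA]
        · by_cases h5 : p = "nut-free"
          · subst h5; simp [pvCondA]
          · simp [pvCondA, h1, h2, h3, h4, h5]

theorem pvLoop_eq (tags : PySem.Set String) (prefs : List String) (acc : List String) :
    prefs.foldl (fun acc p =>
      let acc := if p == "vegan" && !(PySem.Set.contains tags "vegan") then acc ++ [p] else acc
      let acc := if p == "vegetarian" && (!(PySem.Set.contains tags "vegetarian") && !(PySem.Set.contains tags "vegan")) then acc ++ [p] else acc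
      let acc := if p == "gluten-free" && !(PySem.Set.contains tags "gluten-free") then acc ++ [p] else acc
      let acc := if p == "dairy-free" && !(PySem.Set.contains tags "dairy-free") then acc ++ [p] else acc
      let acc := if p == "nut-free" && !(PySem.Set.contains tags "nut-free") then acc ++ [p] else acc
      acc) acc = acc ++ prefs.filter (pvCondA tags) := by
  induction prefs generalizing acc with
  | nil => simp
  | cons p rest ih =>
    rw [List.foldl_cons, pvStep_eq tags acc p, ih]
    by_cases h : pvCondA tags p <;> simp [h]

-- set(filter) = filter(set): dedup commutes with an element-determined filter
theorem pvOfList_filter (q : String → Bool) (l : List String) :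
    PySem.Set.ofList (l.filter q) = (PySem.Set.ofList l).filter q := by
  induction l using List.reverseRecOn with
  | nil => rfl
  | append_singleton l x ih =>
    rw [List.filter_append, PySem.Set.ofList_append_singleton]
    by_cases hq : q x = true
    · simp only [List.filter_cons, hq, if_pos, List.filter_nil,
        PySem.Set.ofList_append_singleton, ih, PySem.Set.add_eq_ite, PySem.Set.add_eq_ite]
      by_cases hx : x ∈ PySem.Set.ofList l
      · simp [hx, List.mem_filter.mpr ⟨hx, hq⟩]
      · have hx' : x ∉ (PySem.Set.ofList l).filter q := fun h => hx (List.mem_filter.mp h).1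
        simp [hx, hx', List.filter_append, hq]
    · simp only [List.filter_cons, hq]
      simp only [Bool.false_eq_true, if_false, List.filter_nil, List.append_nil, ih,
        PySem.Set.add_eq_ite]
      by_cases hx : x ∈ PySem.Set.ofList l
      · simp [hx]
      · simp [hx, List.filter_append, hq]

-- membership in the satisfied-set fold
theorem pvMem_fold_union (l : List String) (s : PySem.Set String)
    (f : String → PySem.Set String) (y : String) :
    (y ∈ l.foldl (fun s t => PySem.Set.union s (f t)) s) ↔ (y ∈ s ∨ ∃ t ∈ l, y ∈ f t) := by
  induction l generalizing s with
  | nil => simp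
  | cons t rest ih =>
    rw [List.foldl_cons, ih]
    constructor
    · rintro (h | h)
      · rcases (PySem.Set.mem_union _ _ _).mp h with h | h
        · exact Or.inl h
        · exact Or.inr ⟨t, by simp, h⟩
      · rcases h with ⟨u, hu, hy⟩; exact Or.inr ⟨u, by simp [hu], hy⟩
    · rintro (h | ⟨u, hu, hy⟩)
      · exact Or.inl ((PySem.Set.mem_union _ _ _).mpr (Or.inl h))
      · rcases List.mem_cons.mp hu with rfl | hu
        · exact Or.inl ((PySem.Set.mem_union _ _ _).mpr (Or.inr hy))
        · exact Or.inr ⟨u, hu, hy⟩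

-- the table, resolved for an arbitrary tag
theorem pvSat_getD (t : String) :
    PySem.Dict.getD pvSatisfies t PySem.Set.empty =
      if t = "vegan" then ["vegan", "vegetarian"]
      else if t = "vegetarian" then ["vegetarian"]
      else if t = "gluten-free" then ["gluten-free"]
      else if t = "dairy-free" then ["dairy-free"]
      else if t = "nut-free" then ["nut-free"]
      else [] := by
  by_cases h1 : t = "vegan"
  · subst h1; rfl
  · by_cases h2 : t = "vegetarian"
    · subst h2; rfl
    · by_cases h3 : t = "gluten-free"
      · subst h3; rfl
      · by_cases h4 : t = "dairy-free"
        · subst h4; rfl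
        · by_cases h5 : t = "nut-free"
          · subst h5; rfl
          · simp [pvSatisfies, PySem.Dict.getD_eq_get?_getD, PySem.Dict.get?,
              beq_iff_eq, PySem.Set.empty,
              Ne.symm h1, Ne.symm h2, Ne.symm h3, Ne.symm h4, Ne.symm h5, h1, h2, h3, h4, h5]

-- membership in satisfied, per fixed preference
theorem pvSatisfied_mem (tags : List String) (p : String) (hp : p ∈ PySem.Dict.keys pvSatisfies) :
    (p ∈ tags.foldl (fun s t => PySem.Set.union s (PySem.Dict.getD pvSatisfies t PySem.Set.empty)) PySem.Set.empty)
      ↔ (p ∈ tags ∨ (p = "vegetarian" ∧ "vegan" ∈ tags)) := by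
  rw [pvMem_fold_union]
  have hkeys : p = "vegan" ∨ p = "vegetarian" ∨ p = "gluten-free" ∨ p = "dairy-free" ∨ p = "nut-free" := by
    simpa [pvSatisfies, PySem.Dict.keys, PySem.Dict.mk] using hp
  constructor
  · rintro (h | ⟨t, ht, hy⟩)
    · simp [PySem.Set.empty] at h
    · rw [pvSat_getD] at hy
      rcases hkeys with rfl | rfl | rfl | rfl | rfl <;>
        (split_ifs at hy with h1 h2 h3 h4 h5 <;> simp_all)
  · rintro (h | ⟨rfl, h⟩)
    · refine Or.inr ⟨p, h, ?_⟩
      rw [pvSat_getD]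
      rcases hkeys with rfl | rfl | rfl | rfl | rfl <;> simp
    · exact Or.inr ⟨"vegan", h, by rw [pvSat_getD]; simp⟩

-- pointwise: A's condition equals B's (known ∧ not satisfied) test
theorem pvCond_eq (tags : List String) (p : String) :
    pvCondA (PySem.Set.ofList tags) p =
      (PySem.Set.contains pvKnown p &&
        !(PySem.Set.contains
            (tags.foldl (fun s t => PySem.Set.union s (PySem.Dict.getD pvSatisfies t PySem.Set.empty)) PySem.Set.empty) p)) := by
  have hkeys : ∀ q : String, q ∈ PySem.Dict.keys pvSatisfies ↔
      (q = "vegan" ∨ q = "vegetarian" ∨ q = "gluten-free" ∨ q = "dairy-free" ∨ q = "nut-free") := by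
    intro q; simp [pvSatisfies, PySem.Dict.keys]
  by_cases hk : p ∈ PySem.Dict.keys pvSatisfies
  · have hknown : PySem.Set.contains pvKnown p = true := by
      rw [PySem.Set.contains_iff, pvKnown, PySem.Set.mem_ofList]; exact hk
    rw [hknown, Bool.true_and]
    have hs := pvSatisfied_mem tags p hk
    simp only [PySem.Set.empty] at hs
    rcases (hkeys p).mp hk with rfl | rfl | rfl | rfl | rfl
    · by_cases hv : ("vegan" : String) ∈ tags <;>
        simp [pvCondA, PySem.Set.mem_ofList, hs, hv]
    · by_cases hv : ("vegan" : String) ∈ tags <;> by_cases hw : ("vegetarian" : String) ∈ tags <;>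
        simp [pvCondA, PySem.Set.mem_ofList, hs, hv, hw]
    · by_cases hg : ("gluten-free" : String) ∈ tags <;>
        simp [pvCondA, PySem.Set.mem_ofList, hs, hg]
    · by_cases hd : ("dairy-free" : String) ∈ tags <;>
        simp [pvCondA, PySem.Set.mem_ofList, hs, hd]
    · by_cases hn : ("nut-free" : String) ∈ tags <;>
        simp [pvCondA, PySem.Set.mem_ofList, hs, hn]
  · have hknown : PySem.Set.contains pvKnown p = false := by
      rw [Bool.eq_false_iff]; intro hc
      exact hk ((PySem.Set.mem_ofList _ _).mp ((PySem.Set.contains_iff _ _).mp hc))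
    rw [hknown, Bool.false_and]
    have h1 : p ≠ "vegan" := fun h => hk ((hkeys p).mpr (Or.inl h))
    have h2 : p ≠ "vegetarian" := fun h => hk ((hkeys p).mpr (Or.inr (Or.inl h)))
    have h3 : p ≠ "gluten-free" := fun h => hk ((hkeys p).mpr (Or.inr (Or.inr (Or.inl h))))
    have h4 : p ≠ "dairy-free" := fun h => hk ((hkeys p).mpr (Or.inr (Or.inr (Or.inr (Or.inl h)))))
    have h5 : p ≠ "nut-free" := fun h => hk ((hkeys p).mpr (Or.inr (Or.inr (Or.inr (Or.inr h)))))
    simp [pvCondA, h1, h2, h3, h4, h5]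

-- ===== VERDICT =====
theorem dietary_conflict_spec : Claim_equal_dietary_conflict := by
  intro item prefs _
  show dietary_conflict item prefs = dietary_conflict_alt item prefs
  simp only [dietary_conflict, dietary_conflict_alt, pvLoop_eq, List.nil_append]
  rw [pvOfList_filter]
  show _ = List.filter _ (List.filter _ _)
  rw [List.filter_filter]
  exact List.filter_congr (fun p _ => by rw [pvCond_eq]; exact Bool.and_comm _ _)
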